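-- pv_equiv track=rewrite | github.com/wakamex/gradient-bang | src/gradientbang/pipecat_server/subagents/task_agent.py | _progress_message_for_reasons
-- ===== SOURCE A (Python) =====
-- from typing import Any, Callable, Dict, List, Optional
--
-- def _progress_message_for_reasons(reasons: List[str]) -> str:
--     if any(reason == "event.query" for reason in reasons):
--         return "Analyzing query results..."
--     if "steering" in reasons:
--         return "Replanning with new instructions..."
--     if any(reason.startswith("tool(load_game_info):") for reason in reasons):
--         return "Reviewing loaded reference info..."
--     if any(reason.startswith("tool(plot_course):") for reason in reasons):
--         return "Planning route from the latest map data..."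
--     if reasons and any(reason != "no_tool_nudge" for reason in reasons):
--         return "Reviewing latest results..."
--     return "Choosing the next step..."
-- ===== SOURCE B (Python) =====
-- from typing import List
--
-- _MESSAGES = [
--     "Analyzing query results...",
--     "Replanning with new instructions...",
--     "Reviewing loaded reference info...",
--     "Planning route from the latest map data...",
--     "Reviewing latest results...",
--     "Choosing the next step...",
-- ]
--
--
-- def _rank(reason: str) -> int:
--     if reason == "event.query":
--         return 0
--     if reason == "steering":
--         return 1
--     if reason.startswith("tool(load_game_info):"):
--         return 2
--     if reason.startswith("tool(plot_course):"):
--         return 3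
--     if reason == "no_tool_nudge":
--         return 5
--     return 4
--
--
-- def _progress_message_for_reasons(reasons: List[str]) -> str:
--     return _MESSAGES[min(map(_rank, reasons), default=5)]
-- ===== Notes on version B (the rewrite author's own statement) =====
-- stated objective: alternative
-- what changed: B maps each reason to a numeric priority rank, takes the minimum rank over the list (default 5 when empty), and indexes a message table, replacing A's cascade of five separate membership/any scans with a rank-and-min reduction.
import Mathlib
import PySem

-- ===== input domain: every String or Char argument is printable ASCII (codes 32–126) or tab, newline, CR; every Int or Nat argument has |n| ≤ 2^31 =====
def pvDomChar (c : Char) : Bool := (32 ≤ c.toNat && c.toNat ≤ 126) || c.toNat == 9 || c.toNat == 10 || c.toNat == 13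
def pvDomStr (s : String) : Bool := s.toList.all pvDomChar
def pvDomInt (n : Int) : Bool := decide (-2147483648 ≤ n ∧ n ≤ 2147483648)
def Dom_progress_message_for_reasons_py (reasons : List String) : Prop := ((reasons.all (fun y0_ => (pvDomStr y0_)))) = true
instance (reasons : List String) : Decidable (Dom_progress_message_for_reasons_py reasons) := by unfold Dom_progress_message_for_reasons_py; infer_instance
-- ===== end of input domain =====

-- B replaces A's cascade of five separate scans by mapping each reason to a numeric
-- priority rank, taking the minimum rank (default 5 when empty) and indexing a
-- message table (alternative algorithm, same cost).


-- ===== PORT A =====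
def progress_message_for_reasons_py (reasons : List String) : String :=
  if reasons.any (fun reason => reason == "event.query") then
    "Analyzing query results..."
  else if reasons.contains "steering" then
    "Replanning with new instructions..."
  else if reasons.any (fun reason => PySem.Str.startswith reason "tool(load_game_info):") then
    "Reviewing loaded reference info..."
  else if reasons.any (fun reason => PySem.Str.startswith reason "tool(plot_course):") then
    "Planning route from the latest map data..."
  else if (!reasons.isEmpty) && reasons.any (fun reason => reason != "no_tool_nudge") then
    "Reviewing latest results..."
  else
    "Choosing the next step..."

-- ===== PORT B =====
def pvMessages : List String :=
  [ "Analyzing query results...",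
    "Replanning with new instructions...",
    "Reviewing loaded reference info...",
    "Planning route from the latest map data...",
    "Reviewing latest results...",
    "Choosing the next step..." ]

def pvRank (reason : String) : Nat :=
  if reason == "event.query" then 0
  else if reason == "steering" then 1
  else if PySem.Str.startswith reason "tool(load_game_info):" then 2
  else if PySem.Str.startswith reason "tool(plot_course):" then 3
  else if reason == "no_tool_nudge" then 5
  else 4

-- min(map(_rank, reasons), default=5); the index is always 0..5, so the list
-- indexing `_MESSAGES[idx]` is in range and ported as List.getD.
def progress_message_for_reasons_py_alt (reasons : List String) : String :=
  let idx : Nat :=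
    match reasons.map pvRank with
    | [] => 5
    | r :: rs => rs.foldl min r
  pvMessages.getD idx ""

-- ===== PRECONDITION & SPEC =====
def Spec_progress_message_for_reasons_py (reasons : List String) (out : String) : Prop := out = progress_message_for_reasons_py_alt reasons
instance (reasons : List String) (out : String) : Decidable (Spec_progress_message_for_reasons_py reasons out) := by unfold Spec_progress_message_for_reasons_py; infer_instance

-- ===== CLAIM (what is proved, stated in full; the proofs are below) =====
def Claim_equal_progress_message_for_reasons_py : Prop := ∀ (reasons : List String), Dom_progress_message_for_reasons_py reasons → Spec_progress_message_for_reasons_py reasons (progress_message_for_reasons_py reasons)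

-- ===== LEMMAS AND PROOFS =====
-- the priority cascade as a number on five abstract booleans
def pvChainB (b1 b2 b3 b4 b5 : Bool) : Nat :=
  if b1 then 0 else if b2 then 1 else if b3 then 2 else if b4 then 3 else if b5 then 4 else 5

-- the cascade number of a list: pvChainB applied to A's five tests
def pvChain (xs : List String) : Nat :=
  pvChainB (xs.any (fun r => r == "event.query")) (xs.contains "steering")
    (xs.any (fun r => PySem.Str.startswith r "tool(load_game_info):"))
    (xs.any (fun r => PySem.Str.startswith r "tool(plot_course):"))
    (xs.any (fun r => r != "no_tool_nudge"))

theorem pvRank_le (r : String) : pvRank r ≤ 5 := by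
  unfold pvRank; split_ifs <;> omega

-- taking min with one element's rank advances the cascade number (pure boolean fact)
theorem pvChainB_min : ∀ c1 c2 c3 c4 c5 b1 b2 b3 b4 b5 : Bool,
    min (if c1 then 0 else if c2 then 1 else if c3 then 2 else if c4 then 3 else if c5 then 5 else 4)
        (pvChainB b1 b2 b3 b4 b5)
      = pvChainB (c1 || b1) (c2 || b2) (c3 || b3) (c4 || b4) (!c5 || b5) := by decide

theorem pvMin_chain (r : String) (xs : List String) :
    min (pvRank r) (pvChain xs) = pvChain (r :: xs) := by
  have h := pvChainB_min (r == "event.query") (r == "steering")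
    (PySem.Str.startswith r "tool(load_game_info):")
    (PySem.Str.startswith r "tool(plot_course):")
    (r == "no_tool_nudge")
    (xs.any (fun r => r == "event.query")) (xs.contains "steering")
    (xs.any (fun r => PySem.Str.startswith r "tool(load_game_info):"))
    (xs.any (fun r => PySem.Str.startswith r "tool(plot_course):"))
    (xs.any (fun r => r != "no_tool_nudge"))
  have hc : ("steering" == r) = (r == "steering") := by
    by_cases hr : r = "steering"
    · subst hr; rfl
    · simp [hr, Ne.symm hr]
  unfold pvChain pvRank
  simp only [List.any_cons, List.contains_cons, bne] at h ⊢
  rw [hc]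
  exact h

theorem pvFoldMin (xs : List String) (a : Nat) (ha : a ≤ 5) :
    (xs.map pvRank).foldl min a = min a (pvChain xs) := by
  induction xs generalizing a with
  | nil => simp [pvChain, pvChainB]; omega
  | cons r xs ih =>
    simp only [List.map_cons, List.foldl_cons]
    rw [ih (min a (pvRank r)) (le_trans (Nat.min_le_left _ _) ha)]
    rw [Nat.min_assoc, pvMin_chain]

-- the cascade of messages equals looking up the cascade number (pure boolean fact)
theorem pvCascade_eq (b1 b2 b3 b4 b5 : Bool) :
    (if b1 then "Analyzing query results..."
     else if b2 then "Replanning with new instructions..."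
     else if b3 then "Reviewing loaded reference info..."
     else if b4 then "Planning route from the latest map data..."
     else if b5 then "Reviewing latest results..."
     else "Choosing the next step...")
      = pvMessages.getD (pvChainB b1 b2 b3 b4 b5) "" := by
  cases b1 <;> cases b2 <;> cases b3 <;> cases b4 <;> cases b5 <;> rfl

-- ===== VERDICT (by name: the statement is the Claim_ definition above) =====
theorem progress_message_for_reasons_py_spec : Claim_equal_progress_message_for_reasons_py := by
  intro reasons _
  unfold Spec_progress_message_for_reasons_py
  cases reasons with
  | nil => rfl
  | cons h t =>
    have hB : progress_message_for_reasons_py_alt (h :: t)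
        = pvMessages.getD (pvChain (h :: t)) "" := by
      simp only [progress_message_for_reasons_py_alt, List.map_cons]
      rw [pvFoldMin t (pvRank h) (pvRank_le h), pvMin_chain]
    have hA : progress_message_for_reasons_py (h :: t)
        = pvMessages.getD (pvChain (h :: t)) "" := by
      unfold progress_message_for_reasons_py
      rw [show (!(h :: t).isEmpty) = true from rfl, Bool.true_and]
      unfold pvChain
      exact pvCascade_eq _ _ _ _ _
    rw [hA, hB]
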